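-- pv_equiv track=rewrite | github.com/SrOscuroBlck/TasteBudMVP-Backend | services/features/features.py | has_allergen
-- ===== SOURCE A (Python) =====
-- from typing import Dict, List, Optional
--
-- CANON_INGREDIENTS: Dict[str, Dict] = {
--     "tomato": {"allergen": None, "axes": {"sour": 0.6, "umami": 0.2}},
--     "mozzarella": {"allergen": "lactose", "axes": {"fatty": 0.7, "umami": 0.3}},
--     "basil": {"allergen": None, "axes": {"sour": 0.1}},
--     "dough": {"allergen": "gluten", "axes": {"sweet": 0.1}},
--     "beef": {"allergen": None, "axes": {"umami": 0.7, "fatty": 0.5}},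
--     "chili": {"allergen": None, "axes": {"spicy": 0.9, "sour": 0.2}},
--     "peanut": {"allergen": "peanut", "axes": {"fatty": 0.6}},
--     "shrimp": {"allergen": "shellfish", "axes": {"umami": 0.6}},
--     "tofu": {"allergen": None, "axes": {"umami": 0.3}},
-- }
--
-- def canonicalize_ingredient(name: str) -> str:
--     return name.strip().lower().replace(" ", "_")
--
-- def has_allergen(allergies: List[str], ingredients: List[str], explicit_allergens: Optional[List[str]] = None) -> bool:
--     alls = set(map(str.lower, allergies))
--     if explicit_allergens:
--         if any(a.lower() in alls for a in explicit_allergens):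
--             return True
--     for ing in ingredients:
--         key = canonicalize_ingredient(ing)
--         meta = CANON_INGREDIENTS.get(key)
--         if meta and meta.get("allergen") and meta["allergen"].lower() in alls:
--             return True
--     return False
-- ===== SOURCE B (Python) =====
-- from typing import Dict, List, Optional
--
-- CANON_INGREDIENTS: Dict[str, Dict] = {
--     "tomato": {"allergen": None, "axes": {"sour": 0.6, "umami": 0.2}},
--     "mozzarella": {"allergen": "lactose", "axes": {"fatty": 0.7, "umami": 0.3}},
--     "basil": {"allergen": None, "axes": {"sour": 0.1}},
--     "dough": {"allergen": "gluten", "axes": {"sweet": 0.1}},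
--     "beef": {"allergen": None, "axes": {"umami": 0.7, "fatty": 0.5}},
--     "chili": {"allergen": None, "axes": {"spicy": 0.9, "sour": 0.2}},
--     "peanut": {"allergen": "peanut", "axes": {"fatty": 0.6}},
--     "shrimp": {"allergen": "shellfish", "axes": {"umami": 0.6}},
--     "tofu": {"allergen": None, "axes": {"umami": 0.3}},
-- }
--
-- def canonicalize_ingredient(name: str) -> str:
--     return name.strip().lower().replace(" ", "_")
--
-- def has_allergen(allergies: List[str], ingredients: List[str], explicit_allergens: Optional[List[str]] = None) -> bool:
--     # Direction flip: gather every lowered hazard (explicit allergens + allergens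
--     # present in the ingredients) into one set, then scan the user's allergies once.
--     hazards = {a.lower() for a in (explicit_allergens or [])}
--     for ing in ingredients:
--         meta = CANON_INGREDIENTS.get(canonicalize_ingredient(ing))
--         if meta and meta.get("allergen"):
--             hazards.add(meta["allergen"].lower())
--     return any(al.lower() in hazards for al in allergies)
-- ===== Notes on version B (the rewrite author's own statement) =====
-- stated objective: alternative
-- what changed: A builds a set of the user's allergies and scans explicit allergens then ingredients with early returns; B flips the direction: it collects all lowered hazards (explicit + ingredient allergens) into one set and does a single scan over the user's allergies.
import Mathlib
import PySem

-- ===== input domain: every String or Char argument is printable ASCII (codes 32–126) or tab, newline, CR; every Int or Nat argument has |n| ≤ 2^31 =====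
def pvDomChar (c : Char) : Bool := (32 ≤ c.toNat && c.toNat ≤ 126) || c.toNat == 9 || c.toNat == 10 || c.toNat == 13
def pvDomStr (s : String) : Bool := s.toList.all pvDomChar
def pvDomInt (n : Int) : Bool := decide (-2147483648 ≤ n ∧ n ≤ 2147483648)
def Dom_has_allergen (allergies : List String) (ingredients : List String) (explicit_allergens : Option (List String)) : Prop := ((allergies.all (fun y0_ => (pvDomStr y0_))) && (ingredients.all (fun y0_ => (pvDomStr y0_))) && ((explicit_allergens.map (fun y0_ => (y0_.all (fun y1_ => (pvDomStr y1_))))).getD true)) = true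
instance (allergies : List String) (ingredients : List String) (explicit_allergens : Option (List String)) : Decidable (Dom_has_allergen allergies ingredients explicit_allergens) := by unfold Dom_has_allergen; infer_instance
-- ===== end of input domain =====

-- B flips the scan direction: it gathers all lowered hazards (explicit + ingredient allergens)
-- into one set and scans the user's allergies once, instead of A's allergy-set + two early-return scans.


-- ===== PORT A =====
-- CANON_INGREDIENTS, modelled by its "allergen" field only (the "axes" field is never read
-- by has_allergen); the outer dict lookup is exact.
def pvCanonAllergens : PySem.Dict String (Option String) := PySem.Dict.ofList
  [("tomato", none), ("mozzarella", some "lactose"), ("basil", none),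
   ("dough", some "gluten"), ("beef", none), ("chili", none),
   ("peanut", some "peanut"), ("shrimp", some "shellfish"), ("tofu", none)]

def canonicalize_ingredient (name : String) : String :=
  PySem.Str.replace (PySem.Str.lower (PySem.Str.strip name)) " " "_"

def has_allergen (allergies : List String) (ingredients : List String) (explicit_allergens : Option (List String)) : Bool :=
  let alls : PySem.Set String := PySem.Set.ofList (allergies.map PySem.Str.lower)
  let explicitHit : Bool :=
    match explicit_allergens with      -- 'if explicit_allergens:' — truthy = some non-empty list
    | some ex => if ex.isEmpty then false else ex.any (fun a => PySem.Set.contains alls (PySem.Str.lower a))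
    | none => false
  if explicitHit then true
  else ingredients.any (fun ing =>     -- early-return for loop
    match PySem.Dict.get? pvCanonAllergens (canonicalize_ingredient ing) with
    | some (some al) => !(al == "") && PySem.Set.contains alls (PySem.Str.lower al)  -- 'meta.get("allergen")' truthy = non-empty
    | _ => false)

-- ===== PORT B =====
def has_allergen_alt (allergies : List String) (ingredients : List String) (explicit_allergens : Option (List String)) : Bool :=
  let hazards0 : PySem.Set String := PySem.Set.ofList ((explicit_allergens.getD []).map PySem.Str.lower)
  let hazards : PySem.Set String := ingredients.foldl (fun s ing =>
    -- 'if meta and meta.get("allergen"): hazards.add(...)' as an Option.elim chain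
    (PySem.Dict.get? pvCanonAllergens (canonicalize_ingredient ing)).elim s (fun m_ =>
      m_.elim s (fun al => if al == "" then s else PySem.Set.add s (PySem.Str.lower al)))) hazards0
  allergies.any (fun al => PySem.Set.contains hazards (PySem.Str.lower al))

-- ===== PRECONDITION & SPEC =====
def Spec_has_allergen (allergies : List String) (ingredients : List String) (explicit_allergens : Option (List String)) (out : Bool) : Prop := out = has_allergen_alt allergies ingredients explicit_allergens
instance (allergies : List String) (ingredients : List String) (explicit_allergens : Option (List String)) (out : Bool) : Decidable (Spec_has_allergen allergies ingredients explicit_allergens out) := by unfold Spec_has_allergen; infer_instance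

-- ===== CLAIM (what is proved, stated in full; the proofs are below) =====
def Claim_equal_has_allergen : Prop := ∀ (allergies : List String) (ingredients : List String) (explicit_allergens : Option (List String)), Dom_has_allergen allergies ingredients explicit_allergens → Spec_has_allergen allergies ingredients explicit_allergens (has_allergen allergies ingredients explicit_allergens)

-- ===== LEMMAS AND PROOFS =====

-- the lowered allergen that ingredient `ing` contributes, if any
def pvHaz (ing : String) : Option String :=
  match PySem.Dict.get? pvCanonAllergens (canonicalize_ingredient ing) with
  | some (some al) => if al == "" then none else some (PySem.Str.lower al)
  | _ => none

def pvBodyA (alls : PySem.Set String) (ing : String) : Bool :=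
  match pvHaz ing with
  | some x => PySem.Set.contains alls x
  | none => false

def pvStepB (s : PySem.Set String) (ing : String) : PySem.Set String :=
  match pvHaz ing with
  | some x => PySem.Set.add s x
  | none => s

lemma pvBodyA_eq (alls : PySem.Set String) :
    (fun ing => match PySem.Dict.get? pvCanonAllergens (canonicalize_ingredient ing) with
      | some (some al) => !(al == "") && PySem.Set.contains alls (PySem.Str.lower al)
      | _ => false) = pvBodyA alls := by
  funext ing
  unfold pvBodyA pvHaz
  rcases h : PySem.Dict.get? pvCanonAllergens (canonicalize_ingredient ing) with _ | (_ | al)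
  · simp only [h]
  · simp only [h]
  · cases he : (al == "") <;> simp [h, he]

lemma pvStepB_eq :
    (fun (s : PySem.Set String) ing =>
      (PySem.Dict.get? pvCanonAllergens (canonicalize_ingredient ing)).elim s (fun m_ =>
        m_.elim s (fun al => if al == "" then s else PySem.Set.add s (PySem.Str.lower al)))) = pvStepB := by
  funext s ing
  unfold pvStepB pvHaz
  rcases h : PySem.Dict.get? pvCanonAllergens (canonicalize_ingredient ing) with _ | (_ | al)
  · simp only [h, Option.elim]
  · simp only [h, Option.elim]
  · cases he : (al == "") <;> simp [h, he, Option.elim]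

lemma pvStepB_none {ing : String} (s : PySem.Set String) (h : pvHaz ing = none) :
    pvStepB s ing = s := by
  unfold pvStepB; rw [h]

lemma pvStepB_some {ing x0 : String} (s : PySem.Set String) (h : pvHaz ing = some x0) :
    pvStepB s ing = PySem.Set.add s x0 := by
  unfold pvStepB; rw [h]

lemma mem_foldl_stepB (l : List String) (s : PySem.Set String) (x : String) :
    x ∈ l.foldl pvStepB s ↔ x ∈ s ∨ ∃ ing ∈ l, pvHaz ing = some x := by
  induction l generalizing s with
  | nil => simp
  | cons i rest ih =>
    simp only [List.foldl_cons, ih, List.mem_cons]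
    rcases h : pvHaz i with _ | x0
    · rw [pvStepB_none s h]
      constructor
      · rintro (h1 | h1)
        · exact Or.inl h1
        · obtain ⟨ing, hm, hx⟩ := h1; exact Or.inr ⟨ing, Or.inr hm, hx⟩
      · rintro (h1 | ⟨ing, (rfl | hm), hx⟩)
        · exact Or.inl h1
        · rw [h] at hx; cases hx
        · exact Or.inr ⟨ing, hm, hx⟩
    · rw [pvStepB_some s h]
      simp only [PySem.Set.mem_add]
      constructor
      · rintro ((h1 | rfl) | h1)
        · exact Or.inl h1
        · exact Or.inr ⟨i, Or.inl rfl, h⟩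
        · obtain ⟨ing, hm, hx⟩ := h1; exact Or.inr ⟨ing, Or.inr hm, hx⟩
      · rintro (h1 | ⟨ing, (rfl | hm), hx⟩)
        · exact Or.inl (Or.inl h1)
        · rw [h] at hx; cases hx; exact Or.inl (Or.inr rfl)
        · exact Or.inr ⟨ing, hm, hx⟩

lemma pvBodyA_true (alls : PySem.Set String) (ing : String) :
    pvBodyA alls ing = true ↔ ∃ x, pvHaz ing = some x ∧ x ∈ alls := by
  unfold pvBodyA
  rcases h : pvHaz ing with _ | x <;> simp [h, PySem.Set.contains_iff]

lemma explicitHit_eq (ex : List String) (f : String → Bool) (b : Bool) :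
    (if (if ex.isEmpty then false else ex.any f) = true then true else b) = (ex.any f || b) := by
  rcases ex with _ | ⟨x, t⟩
  · simp
  · simp only [List.isEmpty_cons, if_false]
    cases h : (x :: t).any f <;> simp [h]

lemma pvCore (allergies ingredients E : List String) :
    ((E.any fun a => PySem.Set.contains (PySem.Set.ofList (allergies.map PySem.Str.lower)) (PySem.Str.lower a)) ||
      ingredients.any (pvBodyA (PySem.Set.ofList (allergies.map PySem.Str.lower)))) =
    (allergies.any fun al => PySem.Set.contains (ingredients.foldl pvStepB (PySem.Set.ofList (E.map PySem.Str.lower))) (PySem.Str.lower al)) := by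
  rw [Bool.eq_iff_iff]
  simp only [Bool.or_eq_true, List.any_eq_true, pvBodyA_true, PySem.Set.contains_iff,
    mem_foldl_stepB, PySem.Set.mem_ofList, List.mem_map]
  constructor
  · rintro (⟨e, he, al, hal, hl⟩ | ⟨ing, hm, x, hx, al, hal, rfl⟩)
    · exact ⟨al, hal, Or.inl ⟨e, he, hl.symm⟩⟩
    · exact ⟨al, hal, Or.inr ⟨ing, hm, hx⟩⟩
  · rintro ⟨al, hal, ⟨e, he, hl⟩ | ⟨ing, hm, hx⟩⟩
    · exact Or.inl ⟨e, he, al, hal, hl.symm⟩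
    · exact Or.inr ⟨ing, hm, _, hx, al, hal, rfl⟩

theorem has_allergen_spec : Claim_equal_has_allergen := by
  intro allergies ingredients explicit_allergens _
  unfold Spec_has_allergen has_allergen has_allergen_alt
  simp only []
  rw [pvStepB_eq, pvBodyA_eq]
  rcases explicit_allergens with _ | ex
  · simp only [Option.getD_none]
    rw [← pvCore allergies ingredients []]
    simp
  · simp only [Option.getD_some]
    rw [explicitHit_eq, pvCore allergies ingredients ex]
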